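-- pv_equiv track=rewrite | github.com/leideng/CANN-8.1.RC1 | Ascend/ascend-toolkit/8.1.RC1/opp/built-in/op_impl/ai_core/tbe/impl/util/attention_qkv_util.py | get_tiling_special_core
-- ===== SOURCE A (Python) =====
-- import math
--
-- def get_tiling_special_core(data_num, tiling_num):
--     matmul_m = math.ceil(data_num / tiling_num)
--     matmul_m_last = data_num // tiling_num
--     last_core_num = 0
--     while (last_core_num <= tiling_num):
--         if matmul_m * (tiling_num - last_core_num) + matmul_m_last * last_core_num == data_num:
--             break
--         else:
--             last_core_num = last_core_num + 1
--     return [matmul_m, tiling_num - last_core_num, matmul_m_last, last_core_num]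
-- ===== SOURCE B (Python) =====
-- def get_tiling_special_core(data_num, tiling_num):
--     matmul_m_last = data_num // tiling_num
--     rem = data_num % tiling_num
--     if rem == 0:
--         return [matmul_m_last, tiling_num, matmul_m_last, 0]
--     last_core_num = max(0, tiling_num - rem)
--     return [matmul_m_last + 1, tiling_num - last_core_num, matmul_m_last, last_core_num]
-- ===== Notes on version B (the rewrite author's own statement) =====
-- stated objective: faster
-- what changed: B solves the tiling equation matmul_m*(t-c) + matmul_m_last*c = data_num in closed form (c = 0 if t divides data_num, else max(0, t - data_num % t)) instead of A's linear search over c = 0..tiling_num.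
-- outside the precondition, e.g. on get_tiling_special_core(7, 0): A raises ZeroDivisionError, B raises ZeroDivisionError
import Mathlib
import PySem

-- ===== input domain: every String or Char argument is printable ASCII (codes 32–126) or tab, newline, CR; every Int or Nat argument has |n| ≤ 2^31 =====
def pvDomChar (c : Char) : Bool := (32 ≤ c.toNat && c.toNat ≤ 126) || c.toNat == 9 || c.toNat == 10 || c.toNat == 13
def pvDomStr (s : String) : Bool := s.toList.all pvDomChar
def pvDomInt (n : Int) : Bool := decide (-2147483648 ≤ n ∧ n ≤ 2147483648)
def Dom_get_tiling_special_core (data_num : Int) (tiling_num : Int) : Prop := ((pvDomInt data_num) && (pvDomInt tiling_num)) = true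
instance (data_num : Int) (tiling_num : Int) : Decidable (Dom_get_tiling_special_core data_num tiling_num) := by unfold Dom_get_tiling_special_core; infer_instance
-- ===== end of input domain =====

-- B replaces A's linear search for the core split by the closed-form solution of the tiling equation (faster: O(1) vs O(tiling_num)).
-- Pre_ excludes tiling_num = 0, where A raises ZeroDivisionError.


-- ===== PORT A =====
-- the while-loop of A; fuel = number of remaining iterations (tiling_num + 1 - last_core_num)
def pvLoopA (matmul_m matmul_m_last data_num tiling_num : Int) : Nat → Int → Int
  | 0, last_core_num => last_core_num
  | fuel + 1, last_core_num =>
    if matmul_m * (tiling_num - last_core_num) + matmul_m_last * last_core_num = data_num then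
      last_core_num
    else
      pvLoopA matmul_m matmul_m_last data_num tiling_num fuel (last_core_num + 1)

def get_tiling_special_core (data_num : Int) (tiling_num : Int) : List Int :=
  -- math.ceil(data_num / tiling_num): exact on Dom (|args| ≤ 2^31, so the float quotient
  -- never rounds across an integer); ported as the integer ceiling -((-data_num) // tiling_num)
  let matmul_m := -(PySem.Int.floordiv (-data_num) tiling_num)
  let matmul_m_last := PySem.Int.floordiv data_num tiling_num
  let last_core_num := pvLoopA matmul_m matmul_m_last data_num tiling_num (tiling_num + 1).toNat 0
  [matmul_m, tiling_num - last_core_num, matmul_m_last, last_core_num]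

-- ===== PORT B =====
def get_tiling_special_core_alt (data_num : Int) (tiling_num : Int) : List Int :=
  let matmul_m_last := PySem.Int.floordiv data_num tiling_num
  let rem := PySem.Int.mod data_num tiling_num
  if rem = 0 then
    [matmul_m_last, tiling_num, matmul_m_last, 0]
  else
    let last_core_num := max 0 (tiling_num - rem)
    [matmul_m_last + 1, tiling_num - last_core_num, matmul_m_last, last_core_num]

-- ===== PRECONDITION & SPEC =====
-- Pre_ excludes exactly tiling_num = 0, on which A raises ZeroDivisionError.
def Pre_get_tiling_special_core (data_num : Int) (tiling_num : Int) : Prop := tiling_num ≠ 0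
instance (data_num : Int) (tiling_num : Int) : Decidable (Pre_get_tiling_special_core data_num tiling_num) := by unfold Pre_get_tiling_special_core; infer_instance
def pvWitness_get_tiling_special_core : Int × Int := (7, 3)

def Spec_get_tiling_special_core (data_num : Int) (tiling_num : Int) (out : List Int) : Prop := out = get_tiling_special_core_alt data_num tiling_num
instance (data_num : Int) (tiling_num : Int) (out : List Int) : Decidable (Spec_get_tiling_special_core data_num tiling_num out) := by unfold Spec_get_tiling_special_core; infer_instance

-- ===== CLAIM (what is proved, stated in full; the proofs are below) =====
def Claim_equal_get_tiling_special_core : Prop := ∀ (data_num : Int) (tiling_num : Int), Dom_get_tiling_special_core data_num tiling_num → Pre_get_tiling_special_core data_num tiling_num → Spec_get_tiling_special_core data_num tiling_num (get_tiling_special_core data_num tiling_num)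

-- ===== LEMMAS AND PROOFS =====

-- integer ceiling -((-d) // t) expressed through floor and remainder, any t ≠ 0
theorem pv_ceil_eq (d t : Int) (ht : t ≠ 0) :
    -(PySem.Int.floordiv (-d) t)
      = PySem.Int.floordiv d t + (if PySem.Int.mod d t = 0 then 0 else 1) := by
  have hd : PySem.Int.floordiv d t * t + PySem.Int.mod d t = d := PySem.Int.floordiv_mul_add_mod d t
  have hnd : PySem.Int.floordiv (-d) t * t + PySem.Int.mod (-d) t = -d := PySem.Int.floordiv_mul_add_mod (-d) t
  set q := PySem.Int.floordiv d t
  set r := PySem.Int.mod d t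
  set q' := PySem.Int.floordiv (-d) t
  set r' := PySem.Int.mod (-d) t
  rcases lt_or_gt_of_ne ht with htneg | htpos
  · have hr := PySem.Int.mod_neg_bounds (a := d) htneg
    have hr' := PySem.Int.mod_neg_bounds (a := -d) htneg
    have hsum : t * (q + q') = -(r + r') := by ring_nf; nlinarith [hd, hnd]
    have h1 : 0 ≤ t * (q + q') := by nlinarith [hr.2, hr'.2]
    have h2 : t * (q + q' + 2) < 0 := by nlinarith [hr.1, hr'.1]
    have hs0 : q + q' ≤ 0 := by nlinarith
    have hs1 : -1 ≤ q + q' := by nlinarith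
    have hs : q + q' = -1 ∨ q + q' = 0 := by
      rcases Int.lt_or_le (q + q') 0 with h | h
      · left; omega
      · right; omega
    by_cases hr0 : r = 0
    · rw [if_pos hr0]
      rcases hs with hs | hs
      · exfalso; nlinarith [hr'.1]
      · omega
    · rw [if_neg hr0]
      rcases hs with hs | hs
      · omega
      · exfalso
        have hrlt : r < 0 := lt_of_le_of_ne hr.2 hr0
        nlinarith [hr'.2]
  · have hr1 : 0 ≤ r := PySem.Int.mod_nonneg (a := d) htpos
    have hr2 : r < t := PySem.Int.mod_lt (a := d) htpos
    by_cases hr0 : r = 0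
    · rw [if_pos hr0]
      rw [PySem.Int.neg_floordiv_neg_eq_iff_of_pos htpos]
      constructor <;> nlinarith
    · rw [if_neg hr0]
      rw [PySem.Int.neg_floordiv_neg_eq_iff_of_pos htpos]
      have : 0 < r := lt_of_le_of_ne hr1 (Ne.symm hr0)
      constructor <;> nlinarith

-- the loop finds t - r (the unique solution) when it starts at or below it
theorem pv_loop_find (ml r t : Int) (hr : 0 < r) :
    ∀ (fuel : Nat) (c : Int), c = (t + 1) - fuel → c ≤ t - r →
      pvLoopA (ml + 1) ml (ml * t + r) t fuel c = t - r := by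
  intro fuel
  induction fuel with
  | zero => intro c hc hle; exfalso; simp at hc; omega
  | succ n ih =>
    intro c hc hle
    by_cases hcr : c = t - r
    · unfold pvLoopA
      rw [if_pos (by rw [hcr]; ring)]
      exact hcr
    · unfold pvLoopA
      rw [if_neg (by intro h; apply hcr; nlinarith [h])]
      exact ih (c + 1) (by push_cast at hc ⊢; omega) (by omega)

theorem get_tiling_special_core_eq (d t : Int) (ht : t ≠ 0) :
    get_tiling_special_core d t = get_tiling_special_core_alt d t := by
  have hd : PySem.Int.floordiv d t * t + PySem.Int.mod d t = d := PySem.Int.floordiv_mul_add_mod d t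
  have hceil := pv_ceil_eq d t ht
  unfold get_tiling_special_core get_tiling_special_core_alt
  set q := PySem.Int.floordiv d t with hq
  set r := PySem.Int.mod d t with hrdef
  rcases lt_or_gt_of_ne ht with htneg | htpos
  · -- t < 0: the while-guard fails at once, fuel = 0
    have hfuel : (t + 1).toNat = 0 := by omega
    rw [hfuel]
    have hr := PySem.Int.mod_neg_bounds (a := d) htneg
    by_cases hr0 : r = 0
    · rw [if_pos hr0] at hceil
      rw [if_pos hr0]
      simp [pvLoopA, hceil]
    · rw [if_neg hr0] at hceil
      rw [if_neg hr0]
      have : max 0 (t - r) = 0 := by omega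
      simp [pvLoopA, hceil, this]
  · have hr1 : 0 ≤ r := PySem.Int.mod_nonneg (a := d) htpos
    have hr2 : r < t := PySem.Int.mod_lt (a := d) htpos
    obtain ⟨k, hk⟩ : ∃ k, (t + 1).toNat = k + 1 := ⟨t.toNat, by omega⟩
    by_cases hr0 : r = 0
    · -- divisible: the loop breaks immediately at last_core_num = 0
      rw [if_pos hr0] at hceil
      rw [if_pos hr0, hk]
      unfold pvLoopA
      rw [hceil]
      have hcond : q * t = d := by linarith [hd]
      simp [hcond]
    · rw [if_neg hr0] at hceil
      rw [if_neg hr0]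
      have hrpos : 0 < r := lt_of_le_of_ne hr1 (Ne.symm hr0)
      have hmax : max 0 (t - r) = t - r := by omega
      have hdval : d = q * t + r := by omega
      have hloop : pvLoopA (q + 1) q (q * t + r) t (t + 1).toNat 0 = t - r := by
        apply pv_loop_find q r t hrpos
        · rw [hk]; push_cast; omega
        · omega
      rw [hceil, hdval]
      simp [hloop, hmax]

-- ===== VERDICT (by name: the statement is the Claim_ definition above) =====
theorem get_tiling_special_core_spec : Claim_equal_get_tiling_special_core := by
  intro d t _ ht
  exact get_tiling_special_core_eq d t ht
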